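-- pv_equiv track=rewrite | github.com/cc13ny/all-in | comp/microsoft/006_lexicographically_smallest_string.py | lex_min_string
-- ===== SOURCE A (Python) =====
-- def lex_min_string(s):
--     if len(s) < 2:
--         return ''
--     i = 0
--     while i < len(s) - 1:
--         if s[i] > s[i+1]:
--             break
--         i += 1
--     return s[:i] + s[i+1:]
-- ===== SOURCE B (Python) =====
-- def lex_min_string(s):
--     if len(s) < 2:
--         return ''
--     return min(s[:i] + s[i+1:] for i in range(len(s)))
-- ===== Notes on version B (the rewrite author's own statement) =====
-- stated objective: simpler
-- what changed: Replaces the greedy first-descent while-loop scan with a one-line exhaustive min over all single-character deletions.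
import Mathlib
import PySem

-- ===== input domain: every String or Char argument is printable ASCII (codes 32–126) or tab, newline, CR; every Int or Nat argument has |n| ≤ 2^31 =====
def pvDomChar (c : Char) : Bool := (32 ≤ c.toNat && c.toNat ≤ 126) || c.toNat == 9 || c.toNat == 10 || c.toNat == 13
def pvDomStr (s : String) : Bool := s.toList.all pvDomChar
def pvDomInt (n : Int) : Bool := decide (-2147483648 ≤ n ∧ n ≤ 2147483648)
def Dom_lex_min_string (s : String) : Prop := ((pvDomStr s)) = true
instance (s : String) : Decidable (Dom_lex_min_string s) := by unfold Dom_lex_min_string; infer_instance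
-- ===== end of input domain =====

-- B replaces A's greedy first-descent while-loop by a one-line min over all single-character
-- deletions: simpler, not faster (A is O(n), B is O(n^2)); return values proved equal on all inputs.

-- ===== PORT A =====
-- A's while loop 'i = 0; while i < len(s)-1: if s[i] > s[i+1]: break; i += 1' as recursion on i.
-- s[i] / s[i+1] are read with List.getD: both indices are in range whenever the loop guard holds,
-- so this is exact.
def lexLoop (cs : List Char) (i : Nat) : Nat :=
  if i < cs.length - 1 then
    if cs.getD i ' ' > cs.getD (i + 1) ' ' then i
    else lexLoop cs (i + 1)
  else i
termination_by cs.length - i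
decreasing_by omega

def lex_min_string (s : String) : String :=
  if PySem.Str.len s < 2 then "" else
    -- s[:i] + s[i+1:] with i the loop's final value
    String.ofList (PySem.List.slice s.toList none (some ((lexLoop s.toList 0 : Nat) : Int)) ++
               PySem.List.slice s.toList (some (((lexLoop s.toList 0 : Nat) : Int) + 1)) none)

-- ===== PORT B =====
-- min(s[:i] + s[i+1:] for i in range(len(s))); the guard makes the candidate list nonempty,
-- so the 'none' branch of min? is unreachable (totality only).
def lex_min_string_alt (s : String) : String :=
  if PySem.Str.len s < 2 then "" else
    match PySem.List.min? ((PySem.List.pyRange 0 (PySem.Str.len s)).map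
        (fun j => String.ofList (PySem.List.slice s.toList none (some j) ++
                             PySem.List.slice s.toList (some (j + 1)) none))) (fun x => x) with
    | some m => m
    | none => ""

-- ===== PRECONDITION & SPEC =====
def Spec_lex_min_string (s : String) (out : String) : Prop := out = lex_min_string_alt s
instance (s : String) (out : String) : Decidable (Spec_lex_min_string s out) := by unfold Spec_lex_min_string; infer_instance

-- ===== CLAIM (what is proved, stated in full; the proofs are below) =====
def Claim_equal_lex_min_string : Prop := ∀ (s : String), Dom_lex_min_string s → Spec_lex_min_string s (lex_min_string s)

-- ===== LEMMAS AND PROOFS =====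

/-- deletion of the character at index `i` -/
def pvDel (cs : List Char) (i : Nat) : List Char := cs.take i ++ cs.drop (i + 1)

/-- A's result, restated structurally: delete the first character that exceeds its successor
(the last character if the string is non-decreasing). -/
def pvGreedy : List Char → List Char
  | [] => []
  | [_] => []
  | a :: b :: t => if b < a then b :: t else a :: pvGreedy (b :: t)

lemma lexLoop_shift (a : Char) (t : List Char) :
    ∀ (k i : Nat), t.length - i ≤ k → lexLoop (a :: t) (i + 1) = lexLoop t i + 1 := by
  intro k
  induction k with
  | zero =>
    intro i h
    conv_lhs => rw [lexLoop.eq_def]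
    conv_rhs => rw [lexLoop.eq_def]
    simp only [List.length_cons]
    rw [if_neg (by omega), if_neg (by omega : ¬ i < t.length - 1)]
  | succ k ih =>
    intro i h
    conv_lhs => rw [lexLoop.eq_def]
    conv_rhs => rw [lexLoop.eq_def]
    simp only [List.length_cons, List.getD_cons_succ]
    by_cases hc : i < t.length - 1
    · rw [if_pos (by omega), if_pos hc]
      by_cases hlt : t.getD i ' ' > t.getD (i + 1) ' '
      · rw [if_pos hlt, if_pos hlt]
      · rw [if_neg hlt, if_neg hlt]
        exact ih (i + 1) (by omega)
    · rw [if_neg (by omega), if_neg hc]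

lemma lexLoop_le (cs : List Char) :
    ∀ (k i : Nat), cs.length - i ≤ k → i ≤ cs.length - 1 → lexLoop cs i ≤ cs.length - 1 := by
  intro k
  induction k with
  | zero =>
    intro i h hi
    rw [lexLoop.eq_def, if_neg (by omega : ¬ i < cs.length - 1)]
    exact hi
  | succ k ih =>
    intro i h hi
    rw [lexLoop.eq_def]
    by_cases hc : i < cs.length - 1
    · rw [if_pos hc]
      by_cases hlt : cs.getD i ' ' > cs.getD (i + 1) ' '
      · rw [if_pos hlt]; exact hi
      · rw [if_neg hlt]; exact ih (i + 1) (by omega) (by omega)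
    · rw [if_neg hc]; exact hi

lemma del_greedy (cs : List Char) (h : cs ≠ []) :
    pvDel cs (lexLoop cs 0) = pvGreedy cs := by
  induction cs using pvGreedy.induct with
  | case1 => exact absurd rfl h
  | case2 c =>
    rw [lexLoop.eq_def]
    simp [pvDel, pvGreedy]
  | case3 a b t hba =>
    rw [lexLoop.eq_def]
    simp only [List.length_cons, List.getD_cons_succ, List.getD_cons_zero, gt_iff_lt]
    rw [if_pos (by omega : 0 < t.length + 1 + 1 - 1), if_pos hba]
    simp [pvDel, pvGreedy, hba]
  | case4 a b t hba ih =>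
    rw [lexLoop.eq_def]
    simp only [List.length_cons, List.getD_cons_succ, List.getD_cons_zero, gt_iff_lt]
    rw [if_pos (by omega : 0 < t.length + 1 + 1 - 1), if_neg hba]
    have hsh : lexLoop (a :: b :: t) (0 + 1) = lexLoop (b :: t) 0 + 1 :=
      lexLoop_shift a (b :: t) (b :: t).length 0 (by omega)
    rw [show (0 + 1 : Nat) = 1 from rfl] at hsh
    rw [hsh]
    have hstep : pvDel (a :: b :: t) (lexLoop (b :: t) 0 + 1) =
        a :: pvDel (b :: t) (lexLoop (b :: t) 0) := by
      simp [pvDel]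
    rw [hstep, ih (by simp)]
    simp [pvGreedy, hba]

lemma greedy_min (cs : List Char) :
    ∀ i : Nat, i < cs.length → @LE.le (List Char) List.instLE (pvGreedy cs) (pvDel cs i) := by
  induction cs using pvGreedy.induct with
  | case1 => intro i hi; simp at hi
  | case2 c =>
    intro i hi
    have : i = 0 := by simpa using hi
    subst this
    simp only [pvGreedy, pvDel, List.take_zero, List.drop_succ_cons, List.drop_nil, List.nil_append]
    exact List.nil_le []
  | case3 a b t hba =>
    intro i hi
    simp only [pvGreedy, if_pos hba]
    match i with
    | 0 =>
      have hdel : pvDel (a :: b :: t) 0 = b :: t := by simp [pvDel]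
      rw [hdel]
      exact List.le_iff_lt_or_eq.mpr (Or.inr rfl)
    | k + 1 =>
      have hstep : pvDel (a :: b :: t) (k + 1) = a :: pvDel (b :: t) k := by simp [pvDel]
      rw [hstep]
      exact List.le_iff_lt_or_eq.mpr (Or.inl (List.cons_lt_cons_iff.mpr (Or.inl hba)))
  | case4 a b t hba ih =>
    intro i hi
    simp only [pvGreedy, if_neg hba]
    match i with
    | 0 =>
      have hdel : pvDel (a :: b :: t) 0 = b :: t := by simp [pvDel]
      rw [hdel]
      rcases lt_trichotomy a b with hab | hab | hab
      · exact List.le_iff_lt_or_eq.mpr (Or.inl (List.cons_lt_cons_iff.mpr (Or.inl hab)))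
      · subst hab
        have hih := ih 0 (by simp)
        have hdel0 : pvDel (a :: t) 0 = t := by simp [pvDel]
        rw [hdel0] at hih
        exact List.cons_le_cons_iff.mpr (Or.inr ⟨rfl, hih⟩)
      · exact absurd hab hba
    | k + 1 =>
      have hstep : pvDel (a :: b :: t) (k + 1) = a :: pvDel (b :: t) k := by simp [pvDel]
      rw [hstep]
      exact List.cons_le_cons_iff.mpr (Or.inr ⟨rfl, ih k (by simpa using hi)⟩)

lemma slice_pair_eq_del (cs : List Char) (k : Nat) :
    PySem.List.slice cs none (some (k : Int)) ++
      PySem.List.slice cs (some ((k : Int) + 1)) none = pvDel cs k := by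
  rw [PySem.List.slice_to cs (Int.natCast_nonneg k),
      PySem.List.slice_from cs (by omega : (0 : Int) ≤ (k : Int) + 1)]
  have h1 : ((k : Int)).toNat = k := Int.toNat_natCast k
  have h2 : ((k : Int) + 1).toNat = k + 1 := by omega
  rw [h1, h2]
  rfl

-- ===== VERDICT (by name: the statement is the Claim_ definition above) =====
theorem lex_min_string_spec : Claim_equal_lex_min_string := by
  intro s _
  unfold Spec_lex_min_string lex_min_string lex_min_string_alt
  by_cases hlen : PySem.Str.len s < 2
  · rw [if_pos hlen, if_pos hlen]
  · rw [if_neg hlen, if_neg hlen]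
    have hlen' : 2 ≤ s.toList.length := by
      have h := PySem.Str.len_eq s
      omega
    have hne : s.toList ≠ [] := by
      intro h; rw [h] at hlen'; simp at hlen'
    have hlencast : PySem.Str.len s = ((s.toList.length : Nat) : Int) := PySem.Str.len_eq s
    rw [hlencast, PySem.List.pyRange_zero_natCast, List.map_map]
    have hmapeq : ((fun j : Int => String.ofList (PySem.List.slice s.toList none (some j) ++
        PySem.List.slice s.toList (some (j + 1)) none)) ∘ fun k : Nat => (k : Int)) =
        fun k : Nat => String.ofList (pvDel s.toList k) := by
      funext k
      simp only [Function.comp, slice_pair_eq_del]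
    rw [hmapeq, slice_pair_eq_del, del_greedy s.toList hne]
    -- the greedy result is a candidate
    have hi0lt : lexLoop s.toList 0 < s.toList.length :=
      lt_of_le_of_lt (lexLoop_le s.toList s.toList.length 0 (by omega) (by omega)) (by omega)
    have hgmem : String.ofList (pvGreedy s.toList) ∈
        (List.range s.toList.length).map (fun k => String.ofList (pvDel s.toList k)) := by
      rw [← del_greedy s.toList hne]
      exact List.mem_map.mpr ⟨lexLoop s.toList 0, List.mem_range.mpr hi0lt, rfl⟩
    cases hmin : PySem.List.min? ((List.range s.toList.length).map
        (fun k => String.ofList (pvDel s.toList k))) (fun x => x) with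
    | none =>
      have hnil := (PySem.List.min?_eq_none_iff _ _).mp hmin
      rw [hnil] at hgmem
      simp at hgmem
    | some m =>
      have hmle : m ≤ String.ofList (pvGreedy s.toList) := by
        simpa using PySem.List.min?_isMin hmin _ hgmem
      obtain ⟨k, hk, hkm⟩ := List.mem_map.mp (PySem.List.min?_mem hmin)
      have hglem : String.ofList (pvGreedy s.toList) ≤ m := by
        rw [← hkm, String.le_iff_toList_le]
        have hgm := greedy_min s.toList k (List.mem_range.mp hk)
        simp only [String.toList_ofList]
        rcases List.le_iff_lt_or_eq.mp hgm with hlt | heq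
        · exact le_of_lt hlt
        · exact le_of_eq heq
      exact (le_antisymm hmle hglem).symm
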